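-- pv_equiv track=rewrite | github.com/Endalebob/competitive-programing | 2100-find-good-days-to-rob-the-bank/2100-find-good-days-to-rob-the-bank.py | goodDaysToRobBank
-- ===== SOURCE A (Python) =====
-- from typing import List
--
-- def goodDaysToRobBank(nums: List[int], time: int) -> List[int]:
--     incr,decr = [1],[1]
--     for i in range(1,len(nums)):
--         if nums[i]>= nums[i-1]:
--             incr.append(incr[-1]+1)
--         else:
--             incr.append(1)
--
--         if nums[i]<= nums[i-1]:
--             decr.append(decr[-1]+1)
--         else:
--             decr.append(1)
--     ans = []
--     for i in range(time,len(nums)-time):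
--         if incr[i+time]-incr[i] >= time and decr[i]-decr[i-time] >= time:
--             ans.append(i)
--     return ans
-- ===== SOURCE B (Python) =====
-- from typing import List
--
-- def goodDaysToRobBank(nums: List[int], time: int) -> List[int]:
--     # backward pass: after[i] = length of the non-decreasing run starting at i,
--     # then one forward scan maintaining the non-increasing run length inline.
--     n = len(nums)
--     after = [1] * n
--     for i in range(n - 2, -1, -1):
--         if nums[i] <= nums[i + 1]:
--             after[i] = after[i + 1] + 1
--     ans = []
--     run = 0
--     for i in range(n):
--         run = run + 1 if i == 0 or nums[i] <= nums[i - 1] else 1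
--         if run > time and after[i] > time:
--             ans.append(i)
--     return ans
-- ===== Notes on version B (the rewrite author's own statement) =====
-- stated objective: alternative
-- what changed: Replaces A's two forward prefix-streak arrays with difference checks over a restricted candidate range by a backward pass building the non-decreasing-run-from-i array plus a single forward scan that maintains the non-increasing run length inline and emits i on direct threshold comparisons over all indices.
import Mathlib
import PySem

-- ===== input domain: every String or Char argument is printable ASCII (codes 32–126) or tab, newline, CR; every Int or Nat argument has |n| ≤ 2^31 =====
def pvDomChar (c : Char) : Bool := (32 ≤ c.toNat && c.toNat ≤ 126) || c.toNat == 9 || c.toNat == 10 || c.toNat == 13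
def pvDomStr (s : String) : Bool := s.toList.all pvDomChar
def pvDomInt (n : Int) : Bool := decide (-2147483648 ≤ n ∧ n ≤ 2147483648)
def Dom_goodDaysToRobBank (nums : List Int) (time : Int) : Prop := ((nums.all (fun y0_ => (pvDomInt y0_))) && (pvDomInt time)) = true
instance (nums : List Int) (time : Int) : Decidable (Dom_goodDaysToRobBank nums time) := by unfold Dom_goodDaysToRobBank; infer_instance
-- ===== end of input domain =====

-- B replaces A's two forward prefix-streak arrays with difference checks over a restricted
-- candidate range by a backward run-length array plus one forward scan with an inline run
-- counter and direct threshold checks (alternative decomposition of the same task).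

-- ===== PORT A =====
def goodDaysToRobBank (nums : List Int) (time : Int) : List Int :=
  let n : Int := PySem.List.len nums
  let id := (PySem.List.pyRange 1 n 1).foldl (fun (p : List Int × List Int) i =>
      (if PySem.List.pyGetD nums i 0 ≥ PySem.List.pyGetD nums (i - 1) 0
         then p.1 ++ [PySem.List.pyGetD p.1 (-1) 0 + 1] else p.1 ++ [1],
       if PySem.List.pyGetD nums i 0 ≤ PySem.List.pyGetD nums (i - 1) 0
         then p.2 ++ [PySem.List.pyGetD p.2 (-1) 0 + 1] else p.2 ++ [1])) ([1], [1])
  (PySem.List.pyRange time (n - time) 1).foldl (fun ans i =>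
      if PySem.List.pyGetD id.1 (i + time) 0 - PySem.List.pyGetD id.1 i 0 ≥ time ∧
         PySem.List.pyGetD id.2 i 0 - PySem.List.pyGetD id.2 (i - time) 0 ≥ time
        then ans ++ [i] else ans) []


-- ===== PORT B =====
def goodDaysToRobBank_alt (nums : List Int) (time : Int) : List Int :=
  let n : Nat := nums.length
  let after := (PySem.List.pyRange ((n : Int) - 2) (-1) (-1)).foldl (fun a i =>
      if PySem.List.pyGetD nums i 0 ≤ PySem.List.pyGetD nums (i + 1) 0
        then PySem.List.pySetD a i (PySem.List.pyGetD a (i + 1) 0 + 1) else a)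
      (List.replicate n (1 : Int))
  ((PySem.List.pyRange 0 (n : Int) 1).foldl (fun (s : Int × List Int) i =>
      let run : Int := if i = 0 ∨ PySem.List.pyGetD nums i 0 ≤ PySem.List.pyGetD nums (i - 1) 0
                         then s.1 + 1 else 1
      (run, if run > time ∧ PySem.List.pyGetD after i 0 > time then s.2 ++ [i] else s.2))
    ((0 : Int), ([] : List Int))).2

-- ===== PRECONDITION & SPEC =====
-- Pre_ excludes time < 0, on which the Python A always raises IndexError in its answer loop.
def Pre_goodDaysToRobBank (nums : List Int) (time : Int) : Prop := 0 ≤ time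
instance (nums : List Int) (time : Int) : Decidable (Pre_goodDaysToRobBank nums time) := by
  unfold Pre_goodDaysToRobBank; infer_instance
def pvWitness_goodDaysToRobBank : List Int × Int := ([2, 1, 1, 3], 1)

def Spec_goodDaysToRobBank (nums : List Int) (time : Int) (out : List Int) : Prop :=
  out = goodDaysToRobBank_alt nums time
instance (nums : List Int) (time : Int) (out : List Int) : Decidable (Spec_goodDaysToRobBank nums time out) := by
  unfold Spec_goodDaysToRobBank; infer_instance

-- ===== CLAIM (what is proved, stated in full; the proofs are below) =====
def Claim_equal_goodDaysToRobBank : Prop := ∀ (nums : List Int) (time : Int), Dom_goodDaysToRobBank nums time → Pre_goodDaysToRobBank nums time → Spec_goodDaysToRobBank nums time (goodDaysToRobBank nums time)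

-- ===== LEMMAS AND PROOFS =====

def gAt (nums : List Int) (k : Nat) : Int := nums.getD k 0

def decrF (nums : List Int) : Nat → Int
  | 0 => 1
  | k+1 => if gAt nums (k+1) ≤ gAt nums k then decrF nums k + 1 else 1

def incrF (nums : List Int) : Nat → Int
  | 0 => 1
  | k+1 => if gAt nums k ≤ gAt nums (k+1) then incrF nums k + 1 else 1

def afterF (nums : List Int) (k : Nat) : Int :=
  if h : k + 1 < nums.length ∧ gAt nums k ≤ gAt nums (k+1) then afterF nums (k+1) + 1 else 1
termination_by nums.length - k

lemma decrF_pos (nums : List Int) (k : Nat) : 1 ≤ decrF nums k := by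
  cases k with
  | zero => simp [decrF]
  | succ k =>
    simp only [decrF]; split
    · have := decrF_pos nums k; omega
    · omega

lemma decrF_le (nums : List Int) (k : Nat) : decrF nums k ≤ (k : Int) + 1 := by
  induction k with
  | zero => simp [decrF]
  | succ k ih =>
    simp only [decrF]; split
    · push_cast; omega
    · push_cast; omega

lemma incrF_pos (nums : List Int) (k : Nat) : 1 ≤ incrF nums k := by
  cases k with
  | zero => simp [incrF]
  | succ k =>
    simp only [incrF]; split
    · have := incrF_pos nums k; omega
    · omega

lemma incrF_succ_le (nums : List Int) (k : Nat) : incrF nums (k+1) ≤ incrF nums k + 1 := by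
  simp only [incrF]; split
  · omega
  · have := incrF_pos nums k; omega

lemma afterF_pos (nums : List Int) (k : Nat) : 1 ≤ afterF nums k := by
  rw [afterF]; split <;> [skip; omega]
  have := afterF_pos nums (k+1); omega
termination_by nums.length - k

lemma afterF_le (nums : List Int) (k : Nat) (h : k < nums.length) :
    afterF nums k ≤ (nums.length : Int) - k := by
  rw [afterF]; split
  · rename_i hc
    have := afterF_le nums (k+1) hc.1
    push_cast at *; omega
  · omega
termination_by nums.length - k

lemma decr_diff_iff (nums : List Int) (t k : Nat) (h : t ≤ k) :
    (t : Int) ≤ decrF nums k - decrF nums (k - t) ↔ (t : Int) + 1 ≤ decrF nums k := by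
  induction t generalizing k with
  | zero =>
    simp
    exact decrF_pos nums k
  | succ t ih =>
    constructor
    · intro hd
      have := decrF_pos nums (k - (t+1)); push_cast at *; omega
    · intro hd
      obtain ⟨k', rfl⟩ : ∃ k', k = k' + 1 := ⟨k - 1, by omega⟩
      have hbr : gAt nums (k'+1) ≤ gAt nums k' := by
        by_contra hb
        simp only [decrF, if_neg hb] at hd; push_cast at hd; omega
      have hstep : decrF nums (k'+1) = decrF nums k' + 1 := by
        simp only [decrF, if_pos hbr]
      have ht' : t ≤ k' := by omega
      have := (ih k' ht').2 (by omega)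
      have hidx : k' + 1 - (t + 1) = k' - t := by omega
      rw [hidx, hstep]
      push_cast at *; omega

lemma incr_diff_iff (nums : List Int) (t k : Nat) (h : k + t < nums.length) :
    (t : Int) ≤ incrF nums (k + t) - incrF nums k ↔ (t : Int) + 1 ≤ afterF nums k := by
  induction t generalizing k with
  | zero =>
    simp
    exact afterF_pos nums k
  | succ t ih =>
    have hk1 : k + 1 + t < nums.length := by omega
    have ihs := ih (k+1) hk1
    have hafter : (↑(t+1) : Int) + 1 ≤ afterF nums k ↔
        (gAt nums k ≤ gAt nums (k+1) ∧ ((t:Int) + 1 ≤ afterF nums (k+1))) := by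
      rw [afterF]
      constructor
      · intro hg
        split at hg
        · rename_i hc; exact ⟨hc.2, by push_cast at *; omega⟩
        · push_cast at hg; omega
      · rintro ⟨hg1, hg2⟩
        rw [dif_pos ⟨by omega, hg1⟩]; push_cast at *; omega
    rw [hafter]
    constructor
    · intro hd
      -- each step adds at most one, so incrF (k+1) ≥ incrF k + 1
      have hchain : ∀ j : Nat, incrF nums (k + 1 + j) ≤ incrF nums (k+1) + j := by
        intro j; induction j with
        | zero => simp
        | succ j ihj =>
          have := incrF_succ_le nums (k + 1 + j)
          have harr : k + 1 + (j+1) = (k + 1 + j) + 1 := by omega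
          rw [harr]; push_cast at *; omega
      have h1 := hchain t
      have harr : k + (t+1) = k + 1 + t := by omega
      rw [harr] at hd
      have h2 : incrF nums k + 1 ≤ incrF nums (k+1) := by push_cast at hd; omega
      have hbr : gAt nums k ≤ gAt nums (k+1) := by
        by_contra hb
        have : incrF nums (k+1) = 1 := by simp only [incrF, if_neg hb]
        have := incrF_pos nums k; omega
      have hstep : incrF nums (k+1) = incrF nums k + 1 := by simp only [incrF, if_pos hbr]
      refine ⟨hbr, ihs.1 ?_⟩
      push_cast at hd ⊢; omega
    · rintro ⟨hg1, hg2⟩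
      have hstep : incrF nums (k+1) = incrF nums k + 1 := by simp only [incrF, if_pos hg1]
      have := ihs.2 hg2
      have harr : k + (t+1) = k + 1 + t := by omega
      rw [harr]
      push_cast at *; omega

-- A's first loop builds exactly the two streak arrays
lemma A_pair_fold (nums : List Int) (m : Nat) :
    (PySem.List.pyRange 1 ((m : Int) + 1) 1).foldl (fun (p : List Int × List Int) i =>
      (if PySem.List.pyGetD nums i 0 ≥ PySem.List.pyGetD nums (i - 1) 0
         then p.1 ++ [PySem.List.pyGetD p.1 (-1) 0 + 1] else p.1 ++ [1],
       if PySem.List.pyGetD nums i 0 ≤ PySem.List.pyGetD nums (i - 1) 0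
         then p.2 ++ [PySem.List.pyGetD p.2 (-1) 0 + 1] else p.2 ++ [1])) ([1], [1])
    = ((List.range (m+1)).map (incrF nums), (List.range (m+1)).map (decrF nums)) := by
  induction m with
  | zero =>
    rw [PySem.List.pyRange_one_eq_nil (by omega)]
    simp [incrF, decrF]
  | succ m ih =>
    have hsp : ((m+1 : Nat) : Int) + 1 = ((m : Int) + 1) + 1 := by push_cast; omega
    rw [hsp, PySem.List.pyRange_one_succ_right (by omega), List.foldl_append, ih]
    have hcast : (m : Int) + 1 = ((m+1 : Nat) : Int) := by push_cast; omega
    have hc1 : PySem.List.pyGetD nums ((m : Int) + 1) 0 = gAt nums (m+1) := by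
      rw [hcast, PySem.List.pyGetD_natCast]; rfl
    have hc2 : PySem.List.pyGetD nums ((m : Int) + 1 - 1) 0 = gAt nums m := by
      have : (m : Int) + 1 - 1 = (m : Int) := by omega
      rw [this, PySem.List.pyGetD_natCast]; rfl
    have hlast1 : PySem.List.pyGetD ((List.range (m+1)).map (incrF nums)) (-1) 0 = incrF nums m := by
      rw [List.range_succ, List.map_append, List.map_singleton]
      exact PySem.List.pyGetD_neg_one_append_singleton _ _ _
    have hlast2 : PySem.List.pyGetD ((List.range (m+1)).map (decrF nums)) (-1) 0 = decrF nums m := by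
      rw [List.range_succ, List.map_append, List.map_singleton]
      exact PySem.List.pyGetD_neg_one_append_singleton _ _ _
    simp only [List.foldl_cons, List.foldl_nil, hc1, hc2, hlast1, hlast2]
    rw [Prod.mk.injEq]
    refine ⟨?_, ?_⟩
    · rw [List.range_succ (n := m+1), List.map_append, List.map_singleton]
      simp only [incrF, ge_iff_le]
      split <;> rfl
    · rw [List.range_succ (n := m+1), List.map_append, List.map_singleton]
      simp only [decrF]
      split <;> rfl

lemma set_map_range (f : Nat → Int) (n k : Nat) (_hk : k < n) (v : Int) :
    ((List.range n).map f).set k v = (List.range n).map (fun i => if i = k then v else f i) := by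
  apply List.ext_getElem
  · simp
  · intro i h1 h2
    simp only [List.getElem_set, List.getElem_map, List.getElem_range]
    simp only [List.length_set, List.length_map, List.length_range] at h1
    simp [eq_comm]

lemma after_fold (nums : List Int) (j : Nat) (hj : j + 1 ≤ nums.length ∨ j = 0) :
    (PySem.List.pyRange ((j : Int) - 1) (-1) (-1)).foldl (fun a i =>
      if PySem.List.pyGetD nums i 0 ≤ PySem.List.pyGetD nums (i + 1) 0
        then PySem.List.pySetD a i (PySem.List.pyGetD a (i + 1) 0 + 1) else a)
      ((List.range nums.length).map (fun k => if j ≤ k then afterF nums k else 1))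
    = (List.range nums.length).map (afterF nums) := by
  induction j with
  | zero =>
    rw [PySem.List.pyRange_neg_one_eq_nil (by omega)]
    simp
  | succ j ih =>
    have hjn : j + 1 ≤ nums.length := by omega
    have hstep : ((j+1 : Nat) : Int) - 1 = (j : Int) := by push_cast; omega
    rw [hstep, PySem.List.pyRange_neg_one_cons (by omega), List.foldl_cons]
    have hc1 : PySem.List.pyGetD nums (j : Int) 0 = gAt nums j := by
      rw [PySem.List.pyGetD_natCast]; rfl
    have hc2 : PySem.List.pyGetD nums ((j : Int) + 1) 0 = gAt nums (j+1) := by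
      have : (j : Int) + 1 = ((j+1 : Nat) : Int) := by push_cast; omega
      rw [this, PySem.List.pyGetD_natCast]; rfl
    by_cases hbr : gAt nums j ≤ gAt nums (j+1)
    · rw [if_pos (by rw [hc1, hc2]; exact hbr)]
      by_cases hread : j + 1 < nums.length
      · have hget : PySem.List.pyGetD ((List.range nums.length).map (fun k => if j+1 ≤ k then afterF nums k else 1)) ((j : Int) + 1) 0 = afterF nums (j+1) := by
          have h1 : (j : Int) + 1 = ((j+1 : Nat) : Int) := by push_cast; omega
          rw [h1, PySem.List.pyGetD_natCast, List.getD_eq_getElem?_getD,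
              List.getElem?_map, List.getElem?_range hread]
          simp
        rw [hget]
        have hset : PySem.List.pySetD ((List.range nums.length).map (fun k => if j+1 ≤ k then afterF nums k else 1)) (j : Int) (afterF nums (j+1) + 1)
            = (List.range nums.length).map (fun k => if j ≤ k then afterF nums k else 1) := by
          rw [PySem.List.pySetD_natCast, set_map_range _ _ _ (by omega)]
          apply List.map_congr_left
          intro i hi
          simp only [List.mem_range] at hi
          by_cases hij : i = j
          · subst hij
            rw [if_pos rfl, if_pos (le_refl _)]
            conv_rhs => rw [afterF]
            rw [dif_pos ⟨hread, hbr⟩]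
          · rw [if_neg hij]
            simp only [show (j + 1 ≤ i) ↔ (j ≤ i) by omega]
        rw [hset]
        exact ih (Or.inl (by omega))
      · -- j + 1 = nums.length : reading a[j+1] is out of range in getD convention,
        -- but this case cannot arise: hj gives j + 1 + 1 ≤ nums.length
        omega
    · rw [if_neg (by rw [hc1, hc2]; exact hbr)]
      have heq : ((List.range nums.length).map (fun k => if j+1 ≤ k then afterF nums k else 1))
          = (List.range nums.length).map (fun k => if j ≤ k then afterF nums k else 1) := by
        apply List.map_congr_left
        intro i hi
        simp only [List.mem_range] at hi
        by_cases hij : i = j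
        · subst hij
          rw [if_neg (by omega), if_pos (le_refl _)]
          rw [afterF]
          rw [dif_neg]
          rintro ⟨h1, h2⟩
          exact hbr h2
        · simp only [show (j + 1 ≤ i) ↔ (j ≤ i) by omega]
      rw [heq]
      exact ih (Or.inl (by omega))

lemma B_main_fold (nums : List Int) (time : Int) (c : Nat) :
    ∀ (m : Nat), m + c = nums.length → ∀ (r : Int) (acc : List Int),
    r = (if m = 0 then 0 else decrF nums (m-1)) →
    ((PySem.List.pyRange (m : Int) ((nums.length : Nat) : Int) 1).foldl (fun (s : Int × List Int) i =>
        (if i = 0 ∨ PySem.List.pyGetD nums i 0 ≤ PySem.List.pyGetD nums (i - 1) 0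
           then s.1 + 1 else 1,
         if (if i = 0 ∨ PySem.List.pyGetD nums i 0 ≤ PySem.List.pyGetD nums (i - 1) 0
               then s.1 + 1 else 1) > time ∧
            PySem.List.pyGetD ((List.range nums.length).map (afterF nums)) i 0 > time
           then s.2 ++ [i] else s.2))
      (r, acc)).2
    = acc ++ ((List.range' m c).filter (fun k =>
        decide (time < decrF nums k) && decide (time < afterF nums k))).map (fun k : Nat => (k : Int)) := by
  induction c with
  | zero =>
    intro m hm r acc hr
    rw [PySem.List.pyRange_one_eq_nil (by omega)]
    simp
  | succ c ih =>
    intro m hm r acc hr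
    have hmn : m < nums.length := by omega
    rw [PySem.List.pyRange_one_cons (by exact_mod_cast hmn), List.foldl_cons]
    have hrun : (if (m : Int) = 0 ∨ PySem.List.pyGetD nums (m : Int) 0 ≤ PySem.List.pyGetD nums ((m : Int) - 1) 0
                   then r + 1 else 1) = decrF nums m := by
      cases m with
      | zero =>
        rw [if_pos (Or.inl (by norm_num))]
        simp only [] at hr
        rw [hr]
        simp [decrF]
      | succ m' =>
        have hg1 : PySem.List.pyGetD nums ((m'+1 : Nat) : Int) 0 = gAt nums (m'+1) := by
          rw [PySem.List.pyGetD_natCast]; rfl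
        have hg2 : PySem.List.pyGetD nums (((m'+1 : Nat) : Int) - 1) 0 = gAt nums m' := by
          have : ((m'+1 : Nat) : Int) - 1 = ((m' : Nat) : Int) := by push_cast; omega
          rw [this, PySem.List.pyGetD_natCast]; rfl
        rw [hg1, hg2]
        simp only [hr, if_neg (show ¬ (m' + 1 = 0) by omega), Nat.add_sub_cancel]
        by_cases hbr : gAt nums (m'+1) ≤ gAt nums m'
        · rw [if_pos (Or.inr hbr)]
          simp only [decrF, if_pos hbr]
        · have hcnd : ¬ ((((m'+1 : Nat)) : Int) = 0 ∨ gAt nums (m'+1) ≤ gAt nums m') := by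
            rintro (h | h)
            · revert h; push_cast; omega
            · exact hbr h
          rw [if_neg hcnd]
          simp only [decrF, if_neg hbr]
    have hafter : PySem.List.pyGetD ((List.range nums.length).map (afterF nums)) (m : Int) 0 = afterF nums m := by
      rw [PySem.List.pyGetD_natCast, List.getD_eq_getElem?_getD, List.getElem?_map,
          List.getElem?_range hmn]
      simp
    simp only [hrun, hafter]
    have hc : (m : Int) + 1 = ((m + 1 : Nat) : Int) := by push_cast; ring
    rw [hc]
    rw [ih (m+1) (by omega) (decrF nums m) _ (by simp)]
    rw [List.range'_succ, List.filter_cons]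
    by_cases hq : time < decrF nums m ∧ time < afterF nums m
    · rw [if_pos (by rw [gt_iff_lt, gt_iff_lt]; exact ⟨hq.1, hq.2⟩)]
      rw [if_pos (by simp [hq.1, hq.2])]
      simp
    · rw [if_neg (by rw [gt_iff_lt, gt_iff_lt]; exact hq)]
      rw [if_neg (by simpa using hq)]

lemma pyGetD_map_range_nat (f : Nat → Int) (n K : Nat) (hK : K < n) :
    PySem.List.pyGetD ((List.range n).map f) ((K : Nat) : Int) 0 = f K := by
  rw [PySem.List.pyGetD_natCast, List.getD_eq_getElem?_getD, List.getElem?_map,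
      List.getElem?_range hK]
  simp

lemma filters_eq (nums : List Int) (time : Int) (ht : 0 ≤ time) :
    (PySem.List.pyRange time ((nums.length : Int) - time) 1).filter (fun i =>
      decide (PySem.List.pyGetD ((List.range nums.length).map (incrF nums)) (i + time) 0
                - PySem.List.pyGetD ((List.range nums.length).map (incrF nums)) i 0 ≥ time ∧
              PySem.List.pyGetD ((List.range nums.length).map (decrF nums)) i 0
                - PySem.List.pyGetD ((List.range nums.length).map (decrF nums)) (i - time) 0 ≥ time))
    = ((List.range nums.length).filter (fun k =>
        decide (time < decrF nums k) && decide (time < afterF nums k))).map (fun k : Nat => (k : Int)) := by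
  obtain ⟨t, rfl⟩ : ∃ t : Nat, time = (t : Int) := ⟨time.toNat, (Int.toNat_of_nonneg ht).symm⟩
  obtain ⟨n, hn⟩ : ∃ n, n = nums.length := ⟨_, rfl⟩
  rw [← hn]
  have hQbound : ∀ k : Nat, k < n →
      ((t : Int) < decrF nums k ∧ (t : Int) < afterF nums k) → t ≤ k ∧ k + t + 1 ≤ n := by
    intro k hk ⟨h1, h2⟩
    have hdl := decrF_le nums k
    have ha := afterF_le nums k (by omega)
    rw [← hn] at ha
    constructor <;> omega
  by_cases hcase : n ≤ 2 * t
  · have hnil : (List.range n).filter (fun k =>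
        decide ((t : Int) < decrF nums k) && decide ((t : Int) < afterF nums k)) = [] := by
      rw [List.filter_eq_nil_iff]
      intro k hk
      rw [List.mem_range] at hk
      simp only [Bool.and_eq_true, decide_eq_true_eq, not_and]
      intro h1 h2
      have := hQbound k hk ⟨h1, h2⟩
      omega
    rw [PySem.List.pyRange_one_eq_nil (by omega), List.filter_nil, hnil]
    simp
  · have h2t : 2 * t < n := by omega
    obtain ⟨d, hd⟩ : ∃ d, d = n - 2 * t := ⟨_, rfl⟩
    have hL : PySem.List.pyRange ((t : Nat) : Int) ((n : Int) - (t : Nat)) 1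
        = (List.range d).map (fun k => ((t : Int) + (k : Nat))) := by
      rw [PySem.List.pyRange_one,
          show ((n : Int) - ((t : Nat) : Int) - ((t : Nat) : Int)).toNat = d by omega]
    rw [hL, List.filter_map]
    have hsplit : List.range n = List.range' 0 t ++ List.range' t d ++ List.range' (t + d) t := by
      have h1 := @List.range'_append 0 t d 1
      have h2 := @List.range'_append 0 (t+d) t 1
      simp only [one_mul, zero_add] at h1 h2
      rw [h1, h2, List.range_eq_range']
      congr 1
      omega
    have hleft : (List.range' 0 t).filter (fun k =>
        decide ((t : Int) < decrF nums k) && decide ((t : Int) < afterF nums k)) = [] := by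
      rw [List.filter_eq_nil_iff]
      intro k hk
      rw [List.mem_range'] at hk
      simp only [Bool.and_eq_true, decide_eq_true_eq, not_and]
      intro h1 h2
      have := hQbound k (by omega) ⟨h1, h2⟩
      omega
    have hright : (List.range' (t + d) t).filter (fun k =>
        decide ((t : Int) < decrF nums k) && decide ((t : Int) < afterF nums k)) = [] := by
      rw [List.filter_eq_nil_iff]
      intro k hk
      rw [List.mem_range'] at hk
      simp only [Bool.and_eq_true, decide_eq_true_eq, not_and]
      intro h1 h2
      have := hQbound k (by omega) ⟨h1, h2⟩
      omega
    conv_rhs => rw [hsplit, List.filter_append, List.filter_append, hleft, hright]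
    rw [List.nil_append, List.append_nil]
    conv_rhs => rw [show List.range' t d = (List.range d).map (fun x => t + x) from List.range'_eq_map_range, List.filter_map]
    have hpred : ∀ k ∈ List.range d,
        ((fun i => decide (PySem.List.pyGetD ((List.range n).map (incrF nums)) (i + ((t : Nat) : Int)) 0
                - PySem.List.pyGetD ((List.range n).map (incrF nums)) i 0 ≥ ((t : Nat) : Int) ∧
              PySem.List.pyGetD ((List.range n).map (decrF nums)) i 0
                - PySem.List.pyGetD ((List.range n).map (decrF nums)) (i - ((t : Nat) : Int)) 0 ≥ ((t : Nat) : Int)))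
          ∘ (fun k : Nat => ((t : Int) + (k : Nat)))) k
        = ((fun k => decide (((t : Nat) : Int) < decrF nums k) && decide (((t : Nat) : Int) < afterF nums k))
          ∘ (fun x => t + x)) k := by
      intro k hk
      rw [List.mem_range] at hk
      simp only [Function.comp_apply]
      have e1 : (t : Int) + (k : Nat) + ((t : Nat) : Int) = (((t + k) + t : Nat) : Int) := by push_cast; ring
      have e2 : (t : Int) + (k : Nat) = ((t + k : Nat) : Int) := by push_cast; ring
      have e3 : (((t + k : Nat)) : Int) - ((t : Nat) : Int) = ((k : Nat) : Int) := by push_cast; ring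
      rw [e1, e2, e3,
          pyGetD_map_range_nat _ _ _ (show (t + k) + t < n by omega),
          pyGetD_map_range_nat (incrF nums) _ _ (show t + k < n by omega),
          pyGetD_map_range_nat (decrF nums) _ _ (show t + k < n by omega),
          pyGetD_map_range_nat _ _ _ (show k < n by omega)]
      rw [← Bool.decide_and, decide_eq_decide]
      have hi := incr_diff_iff nums t (t + k) (by omega)
      have hd2 := decr_diff_iff nums t (t + k) (by omega)
      have hdk : t + k - t = k := by omega
      rw [hdk] at hd2
      constructor
      · rintro ⟨h1, h2⟩
        exact ⟨by have := hd2.1 (by omega); omega, by have := hi.1 (by omega); omega⟩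
      · rintro ⟨h1, h2⟩
        exact ⟨by have := hi.2 (by omega); omega, by have := hd2.2 (by omega); omega⟩
    rw [List.filter_congr hpred]
    conv_rhs => rw [List.map_map]
    apply List.map_congr_left
    intro k _
    simp only [Function.comp_apply]
    push_cast
    ring

lemma AB_eq (nums : List Int) (time : Int) (ht : 0 ≤ time) :
    goodDaysToRobBank nums time = goodDaysToRobBank_alt nums time := by
  rcases nums with _ | ⟨x, xs⟩
  · simp only [goodDaysToRobBank, goodDaysToRobBank_alt, PySem.List.len_eq, List.length_nil]
    have hA : PySem.List.pyRange time (((0:Nat):Int) - time) 1 = [] :=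
      PySem.List.pyRange_one_eq_nil (by omega)
    have hB : PySem.List.pyRange (0:Int) ((0:Nat):Int) 1 = [] :=
      PySem.List.pyRange_one_eq_nil (by omega)
    rw [hA, hB]
    simp
  · simp only [goodDaysToRobBank, goodDaysToRobBank_alt, PySem.List.len_eq, List.length_cons]
    have hcast : ((xs.length + 1 : Nat) : Int) = ((xs.length : Nat) : Int) + 1 := by push_cast; ring
    simp only [hcast]
    rw [A_pair_fold (x :: xs) xs.length]
    -- B side: after array
    have haf := after_fold (x :: xs) xs.length (Or.inl (by simp))
    simp only [List.length_cons] at haf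
    have hsh : ((xs.length : Nat) : Int) + 1 - 2 = ((xs.length : Nat) : Int) - 1 := by ring
    have hinit : List.replicate (xs.length + 1) (1 : Int)
        = (List.range (xs.length + 1)).map (fun k => if xs.length ≤ k then afterF (x :: xs) k else 1) := by
      apply List.ext_getElem
      · simp
      · intro i h1 h2
        simp only [List.getElem_replicate, List.getElem_map, List.getElem_range]
        simp only [List.length_replicate] at h1
        by_cases hi : xs.length ≤ i
        · rw [if_pos hi]
          have hieq : i = xs.length := by omega
          subst hieq
          rw [afterF, dif_neg]
          rintro ⟨hbad, -⟩
          simp at hbad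
        · rw [if_neg hi]
    simp only [hsh, hinit, haf]
    -- B side: main loop
    have hb := B_main_fold (x :: xs) time ((x :: xs).length) 0 (by omega) 0 [] (by simp)
    simp only [List.length_cons, Nat.cast_zero] at hb
    rw [hcast] at hb
    -- A side: answer loop as a filter
    have hfold := PySem.List.foldl_append_if
      (fun i : Int => decide
        (PySem.List.pyGetD ((List.range (xs.length + 1)).map (incrF (x :: xs))) (i + time) 0
           - PySem.List.pyGetD ((List.range (xs.length + 1)).map (incrF (x :: xs))) i 0 ≥ time ∧
         PySem.List.pyGetD ((List.range (xs.length + 1)).map (decrF (x :: xs))) i 0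
           - PySem.List.pyGetD ((List.range (xs.length + 1)).map (decrF (x :: xs))) (i - time) 0 ≥ time))
      (fun y : Int => y)
      (PySem.List.pyRange time (((xs.length : Nat) : Int) + 1 - time) 1) []
    simp only [decide_eq_true_eq, List.map_id', List.nil_append] at hfold
    rw [hfold]
    -- the two filters agree
    have hfe := filters_eq (x :: xs) time ht
    simp only [List.length_cons] at hfe
    rw [hcast] at hfe
    refine Eq.trans ?_ (hb.trans (by rw [List.nil_append])).symm
    rw [← List.range_eq_range']
    exact hfe

-- ===== VERDICT (by name: the statement is the Claim_ definition above) =====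
theorem goodDaysToRobBank_spec : Claim_equal_goodDaysToRobBank := by
  intro nums time _ hpre
  show goodDaysToRobBank nums time = goodDaysToRobBank_alt nums time
  exact AB_eq nums time hpre
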